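-- pv_equiv track=rewrite | github.com/BasileiaRhomaion1453/WHU-CSE-LachineLearning | 几个经典算法/machinelearn.py | MajorClass
-- ===== SOURCE A (Python) =====
-- def MajorClass(labelArr):
--     '''
-- 找到当前标签集中占数目最大的标签
-- :param labelArr: 标签集
-- :return: 最大的标签
--     '''
-- # 建立字典，统计不同类别标签的数量
--     classDict = {}
-- # 遍历所有标签
--     for i in range(len(labelArr)):
--         if labelArr[i] in classDict.keys():
--             classDict[labelArr[i]] += 1
--         else:
--             classDict[labelArr[i]] = 1
-- # 对不同类别标签的统计情况进行降序排序
--     classSort = sorted(classDict.items(), key=lambda x: x[1], reverse=True)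
-- # 返回最大一项的标签，即占数目最多的标签
--     return classSort[0][0]
-- ===== SOURCE B (Python) =====
-- def MajorClass(labelArr):
--     best = 0
--     for i in range(len(labelArr)):
--         if labelArr.count(labelArr[i]) > labelArr.count(labelArr[best]):
--             best = i
--     return labelArr[best]
-- ===== Notes on version B (the rewrite author's own statement) =====
-- stated objective: simpler
-- what changed: Replaced the counting dict plus a value-descending stable sort by a single index scan that keeps the first index whose label's count (computed on demand with list.count) is a strict running maximum, returning labelArr[best].
import Mathlib
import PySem

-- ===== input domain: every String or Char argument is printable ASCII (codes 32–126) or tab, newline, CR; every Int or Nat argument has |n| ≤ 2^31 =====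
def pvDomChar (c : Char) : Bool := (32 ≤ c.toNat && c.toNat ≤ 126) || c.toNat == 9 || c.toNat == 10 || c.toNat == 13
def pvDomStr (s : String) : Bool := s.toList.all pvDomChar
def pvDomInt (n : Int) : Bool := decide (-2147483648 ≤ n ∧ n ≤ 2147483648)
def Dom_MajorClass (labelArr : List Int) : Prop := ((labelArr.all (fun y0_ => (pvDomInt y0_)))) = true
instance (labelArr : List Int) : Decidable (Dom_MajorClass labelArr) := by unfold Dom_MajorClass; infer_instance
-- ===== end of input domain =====

-- B replaces A's counting dict + descending sort by a direct index scan that keeps the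
-- first index whose label's count is a strict running maximum (objective: simpler).


-- ===== PORT A =====
-- builds the counting dict over range(len(labelArr)), sorts the items by value
-- descending (stable), returns the first key; the [] arm is Python's IndexError
-- on an empty list, excluded by Pre_MajorClass.
def MajorClass (labelArr : List Int) : Int :=
  let classDict : PySem.Dict Int Int :=
    (PySem.List.pyRange 0 (PySem.List.len labelArr)).foldl
      (fun d i =>
        let x := PySem.List.pyGetD labelArr i 0
        if d.contains x then d.modify x 0 (· + 1) else d.insert x 1)
      PySem.Dict.empty
  let classSort := PySem.List.sorted classDict.items (fun x => x.2) true
  match classSort with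
  | (k, _) :: _ => k
  | [] => 0

-- ===== PORT B =====
-- index scan: best := first index whose label's count is a strict running max;
-- the final lookup is Python's labelArr[best], an IndexError only on [] (outside Pre_).
def MajorClass_alt (labelArr : List Int) : Int :=
  let best :=
    (PySem.List.pyRange 0 (PySem.List.len labelArr)).foldl
      (fun best i =>
        if PySem.List.count labelArr (PySem.List.pyGetD labelArr best 0) <
           PySem.List.count labelArr (PySem.List.pyGetD labelArr i 0) then i else best)
      0
  PySem.List.pyGetD labelArr best 0

-- ===== PRECONDITION & SPEC =====
-- Pre_ excludes only the empty list, on which both Pythons raise IndexError.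
def Pre_MajorClass (labelArr : List Int) : Prop := labelArr ≠ []
instance (labelArr : List Int) : Decidable (Pre_MajorClass labelArr) := by
  unfold Pre_MajorClass; infer_instance
def pvWitness_MajorClass : List Int := [1, 2, 2]

def Spec_MajorClass (labelArr : List Int) (out : Int) : Prop := out = MajorClass_alt labelArr
instance (labelArr : List Int) (out : Int) : Decidable (Spec_MajorClass labelArr out) := by
  unfold Spec_MajorClass; infer_instance

-- ===== CLAIM (what is proved, stated in full; the proofs are below) =====
def Claim_equal_MajorClass : Prop :=
  ∀ (labelArr : List Int), Dom_MajorClass labelArr → Pre_MajorClass labelArr →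
    Spec_MajorClass labelArr (MajorClass labelArr)

-- ===== LEMMAS AND PROOFS =====

-- the "first strict max" pick on labels, counting in L
def pvPick (L : List Int) (b a : Int) : Int :=
  if PySem.List.count L b < PySem.List.count L a then a else b

-- A's dict-building step is exactly Counter's step
lemma pvStepEq (d : PySem.Dict Int Int) (x : Int) :
    (if d.contains x then d.modify x 0 (· + 1) else d.insert x 1) = d.modify x 0 (· + 1) := by
  by_cases h : d.contains x
  · simp [h]
  · simp only [Bool.not_eq_true] at h
    simp [h, PySem.Dict.modify, PySem.Dict.getD_of_not_contains _ _ h]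

-- head of the insertion fold backing sorted(..., reverse=True)
lemma pvFoldIns (key : Int × Int → Int) :
    ∀ (xs : List (Int × Int)) (h : Int × Int) (t : List (Int × Int)),
      ∃ t', (xs.foldl (fun acc x => PySem.List.insertBy (fun a b => decide (key b < key a)) x acc) (h :: t))
        = (xs.foldl (fun b a => if key b < key a then a else b) h) :: t' := by
  intro xs
  induction xs with
  | nil => intro h t; exact ⟨t, rfl⟩
  | cons a xs ih =>
    intro h t
    simp only [List.foldl_cons]
    by_cases hc : key h < key a
    · have : PySem.List.insertBy (fun a b => decide (key b < key a)) a (h :: t) = a :: h :: t := by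
        simp [PySem.List.insertBy, hc]
      rw [this]
      simpa [hc] using ih a (h :: t)
    · have : PySem.List.insertBy (fun a b => decide (key b < key a)) a (h :: t)
          = h :: PySem.List.insertBy (fun a b => decide (key b < key a)) a t := by
        simp [PySem.List.insertBy, hc]
      rw [this]
      simpa [hc] using ih h _

lemma pvSortedHead (key : Int × Int → Int) (x : Int × Int) (xs : List (Int × Int)) :
    ∃ t', PySem.List.sorted (x :: xs) key true
        = (xs.foldl (fun b a => if key b < key a then a else b) x) :: t' := by
  rw [PySem.List.sorted_rev_eq_foldl_insertBy]
  simpa using pvFoldIns key xs x []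

-- the pair fold over (k, count k) tracks the label fold
lemma pvPairFold (L : List Int) :
    ∀ (u : List Int) (k0 : Int),
      u.foldl (fun (b : Int × Int) a =>
          if b.2 < ((List.count a L : Nat) : Int) then (a, ((List.count a L : Nat) : Int)) else b)
        (k0, ((List.count k0 L : Nat) : Int))
      = (u.foldl (pvPick L) k0, ((List.count (u.foldl (pvPick L) k0) L : Nat) : Int)) := by
  intro u
  induction u with
  | nil => intro k0; rfl
  | cons a u ih =>
    intro k0
    simp only [List.foldl_cons]
    by_cases hc : List.count k0 L < List.count a L
    · have : pvPick L k0 a = a := by simp [pvPick, PySem.List.count, hc]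
      rw [this, ← ih a]
      congr 1
      simp [hc]
    · have : pvPick L k0 a = k0 := by simp [pvPick, PySem.List.count, hc]
      rw [this, ← ih k0]
      congr 1
      simp [hc]

-- B's index fold computes the label fold over the suffix
lemma pvBLoop (L : List Int) :
    ∀ (tl : List Int) (j : Nat) (b : Int), L.drop j = tl → 0 ≤ b → b < L.length →
      PySem.List.pyGetD L
        ((PySem.List.pyRange (j : Int) (PySem.List.len L)).foldl
          (fun best i =>
            if PySem.List.count L (PySem.List.pyGetD L best 0) <
               PySem.List.count L (PySem.List.pyGetD L i 0) then i else best) b) 0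
      = tl.foldl (pvPick L) (PySem.List.pyGetD L b 0) := by
  intro tl
  induction tl with
  | nil =>
    intro j b hj hb0 hb1
    have hlen : L.length ≤ j := List.drop_eq_nil_iff.mp hj
    have : PySem.List.pyRange (j : Int) (PySem.List.len L) = [] := by
      simp [PySem.List.pyRange, PySem.List.len]; omega
    rw [this]; rfl
  | cons a tl ih =>
    intro j b hj hb0 hb1
    have hjlt : j < L.length := by
      by_contra h
      rw [List.drop_eq_nil_iff.mpr (by omega)] at hj
      simp at hj
    have hcd := List.getElem_cons_drop hjlt
    rw [hj] at hcd
    have hLj : L[j] = a := (List.cons_eq_cons.mp hcd).1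
    have hdrop : L.drop (j + 1) = tl := (List.cons_eq_cons.mp hcd).2

    have hgj : PySem.List.pyGetD L (j : Int) 0 = a := by
      rw [PySem.List.pyGetD_natCast, List.getD_eq_getElem?_getD, List.getElem?_eq_getElem hjlt, hLj]
      rfl
    rw [PySem.List.pyRange_one_cons (by simp [PySem.List.len]; omega), List.foldl_cons]
    by_cases hc : PySem.List.count L (PySem.List.pyGetD L b 0) <
        PySem.List.count L (PySem.List.pyGetD L (j : Int) 0)
    · rw [if_pos hc]
      have := ih (j + 1) (j : Int) (by exact_mod_cast hdrop) (by positivity) (by exact_mod_cast hjlt)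
      rw [show (((j + 1 : Nat)) : Int) = ((j : Int) + 1) by push_cast; ring] at this
      rw [this, hgj]
      simp only [List.foldl_cons]
      congr 1
      rw [hgj] at hc
      simp only [pvPick]
      rw [if_pos hc]
    · rw [if_neg hc]
      have := ih (j + 1) b (by exact_mod_cast hdrop) hb0 hb1
      rw [show (((j + 1 : Nat)) : Int) = ((j : Int) + 1) by push_cast; ring] at this
      rw [this]
      simp only [List.foldl_cons]
      congr 1
      rw [hgj] at hc
      simp only [pvPick]
      rw [if_neg hc]

-- duplicates and already-dominated labels never move the pick
lemma pvDedup (L : List Int) :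
    ∀ (xs : List Int) (s : List Int) (b : Int),
      (∀ y ∈ s, List.count y L ≤ List.count b L) →
      xs.foldl (pvPick L) b
        = ((PySem.Set.ofList xs).filter (fun y => decide (y ∉ s))).foldl (pvPick L) b := by
  intro xs
  induction xs with
  | nil => intro s b _; rfl
  | cons a xs ih =>
    intro s b hs
    rw [PySem.Set.ofList_cons, List.foldl_cons]
    by_cases ha : a ∈ s
    · have hpa : pvPick L b a = b := by
        have := hs a ha
        simp [pvPick, PySem.List.count]; omega
      rw [hpa]
      have hfilter : ((PySem.Set.ofList xs).discard a).filter (fun y => decide (y ∉ s))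
          = (PySem.Set.ofList xs).filter (fun y => decide (y ∉ s)) := by
        rw [PySem.Set.discard, List.filter_filter]
        refine List.filter_congr ?_
        intro y _
        by_cases hy : y = a
        · subst hy; simp [ha]
        · simp [hy]
      simp only [List.filter_cons, decide_eq_true_eq]
      rw [if_neg (by simp [ha]), hfilter]
      exact ih s b hs
    · simp only [List.filter_cons, decide_eq_true_eq]
      rw [if_pos (by simp [ha]), List.foldl_cons]
      have hfilter : ((PySem.Set.ofList xs).discard a).filter (fun y => decide (y ∉ s))
          = (PySem.Set.ofList xs).filter (fun y => decide (y ∉ s ++ [a])) := by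
        rw [PySem.Set.discard, List.filter_filter]
        refine List.filter_congr ?_
        intro y _
        by_cases hy : y = a
        · subst hy; simp
        · simp [hy]
      rw [hfilter]
      refine ih (s ++ [a]) (pvPick L b a) ?_
      intro y hy
      rcases List.mem_append.mp hy with h | h
      · have h1 := hs y h
        by_cases hc : List.count b L < List.count a L
        · simp only [pvPick, PySem.List.count, hc, if_true]; omega
        · simp only [pvPick, PySem.List.count, hc, if_false]; omega
      · rw [List.mem_singleton.mp h]
        by_cases hc : List.count b L < List.count a L
        · simp only [pvPick, PySem.List.count, hc, if_true]; omega
        · simp only [pvPick, PySem.List.count, hc, if_false]; omega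

-- ===== VERDICT (by name: the statement is the Claim_ definition above) =====
theorem MajorClass_spec : Claim_equal_MajorClass := by
  intro labelArr _ hpre
  unfold Spec_MajorClass
  cases labelArr with
  | nil => exact absurd rfl hpre
  | cons x t =>
    -- abbreviations
    set L := x :: t with hL
    -- A's dict-building loop is Counter(L)
    have hdict :
        (PySem.List.pyRange 0 (PySem.List.len L)).foldl
          (fun d i =>
            let y := PySem.List.pyGetD L i 0
            if d.contains y then d.modify y 0 (· + 1) else d.insert y 1)
          PySem.Dict.empty = PySem.Dict.counter L := by
      have h1 := PySem.List.foldl_pyRange_pyGetD L 0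
        (fun (d : PySem.Dict Int Int) (y : Int) =>
          if d.contains y then d.modify y 0 (· + 1) else d.insert y 1)
        PySem.Dict.empty (a := 0) le_rfl
      simp only [Int.toNat_zero, List.drop_zero] at h1
      have h2 : L.foldl (fun d y => if d.contains y then d.modify y 0 (· + 1) else d.insert y 1)
          PySem.Dict.empty = PySem.Dict.counter L := by
        rw [PySem.Dict.counter_eq_foldl]
        exact PySem.List.foldl_congr_mem L _ _ _ (fun acc y _ => pvStepEq acc y)
      exact h1.trans h2
    -- B's index loop, via pvBLoop at j = 0, best = 0
    have hB : MajorClass_alt L = t.foldl (pvPick L) x := by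
      have h0 := pvBLoop L L 0 0 (by simp) le_rfl (by simp [hL])
      have hx0 : PySem.List.pyGetD L 0 0 = x := by
        have h := PySem.List.pyGetD_natCast L 0 0
        rw [show ((0 : Nat) : Int) = (0 : Int) from rfl] at h
        rw [h, hL]
        rfl
      unfold MajorClass_alt
      rw [show ((0 : Nat) : Int) = (0 : Int) from rfl] at h0
      rw [h0, hx0, hL, List.foldl_cons]
      congr 1
      simp [pvPick]
    rw [hB]
    -- A's sorted items: head = first-max over the distinct labels
    unfold MajorClass
    rw [hdict]
    simp only []
    rw [PySem.Dict.items_counter, PySem.Set.ofList_cons, List.map_cons]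
    obtain ⟨t', ht'⟩ := pvSortedHead (fun p => p.2) (x, ((List.count x L : Nat) : Int))
      (((PySem.Set.ofList t).discard x).map (fun k => (k, ((List.count k L : Nat) : Int))))
    rw [ht', List.foldl_map]
    have hpair := pvPairFold L ((PySem.Set.ofList t).discard x) x
    simp only [hpair]
    -- both sides are the pick-fold over t resp. over its deduplication
    have hded := pvDedup L t [x] x (by intro y hy; rw [List.mem_singleton.mp hy])
    have hfe : (PySem.Set.ofList t).filter (fun y => decide (y ∉ ([x] : List Int)))
        = (PySem.Set.ofList t).discard x := by
      rw [PySem.Set.discard]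
      exact List.filter_congr (fun y _ => by by_cases h : y = x <;> simp [h])
    rw [hfe] at hded
    exact hded.symm
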